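-- pv_equiv track=rewrite | github.com/MeetSpeakLearn/ExamplesCreatedForTutoring | Python/multiplication.py | digitStringToList
-- ===== SOURCE A (Python) =====
-- def digitToInt(digit: str) -> int:
--     return ord(digit) - ord("0")
--
-- def digitStringToList(val: str, minSize: int) -> list:
--     result = []
--     padCount = minSize - len(val)
--     for i in range (0, padCount):
--         result.append(0)
--     for i in range(0, len(val)):
--         c = val[i]
--         result.insert(0, digitToInt(c))
--     return result
-- ===== SOURCE B (Python) =====
-- def digitToInt(digit: str) -> int:
--     return ord(digit) - ord("0")
--
-- def digitStringToList(val: str, minSize: int) -> list: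
--     n = len(val)
--     total = max(n, minSize)
--     result = [0] * total
--     for i, c in enumerate(val):
--         result[n - 1 - i] = digitToInt(c)
--     return result
-- ===== Notes on version B (the rewrite author's own statement) =====
-- stated objective: faster
-- what changed: Replaces A's two loops (append each padding zero, then insert each digit at the front of the list) with a single preallocated [0]*max(len,minSize) buffer into which each digit is written once at its reversed position.
import Mathlib
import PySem

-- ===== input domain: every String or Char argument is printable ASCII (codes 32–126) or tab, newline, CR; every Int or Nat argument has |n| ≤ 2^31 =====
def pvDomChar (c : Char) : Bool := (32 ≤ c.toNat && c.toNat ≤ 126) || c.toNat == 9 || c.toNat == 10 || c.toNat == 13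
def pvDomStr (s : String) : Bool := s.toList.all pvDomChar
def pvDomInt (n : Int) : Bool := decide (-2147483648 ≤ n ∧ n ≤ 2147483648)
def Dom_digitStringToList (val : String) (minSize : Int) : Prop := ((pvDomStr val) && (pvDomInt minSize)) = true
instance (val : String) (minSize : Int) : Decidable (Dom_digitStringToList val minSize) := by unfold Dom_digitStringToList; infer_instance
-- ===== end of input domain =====

-- B preallocates a zero buffer of length max(len(val), minSize) and writes each digit once at its
-- reversed position, replacing A's append-padding loop plus repeated insert-at-front (objective: faster).

-- ===== PORT A =====
def digitToInt (digit : Char) : Int := (digit.toNat : Int) - 48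

def digitStringToList (val : String) (minSize : Int) : List Int :=
  let l := val.toList
  let padCount : Int := minSize - l.length
  -- for i in range(0, padCount): result.append(0)
  let result : List Int := (PySem.List.pyRange 0 padCount 1).foldl (fun r _ => r ++ [(0 : Int)]) []
  -- for i in range(0, len(val)): c = val[i]; result.insert(0, digitToInt(c))
  (PySem.List.pyRange 0 (l.length : Int) 1).foldl
    (fun r i =>
      let c := PySem.List.pyGetD l i ' '  -- i ∈ range(0, len(val)) is always in range, default unreachable
      digitToInt c :: r)                  -- list.insert(0, x) on a list is exactly cons
    result

-- ===== PORT B =====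
def digitStringToList_alt (val : String) (minSize : Int) : List Int :=
  let l := val.toList
  let n : Int := l.length
  let total : Int := max n minSize
  let result : List Int := List.replicate total.toNat 0   -- [0] * total
  -- for i, c in enumerate(val): result[n - 1 - i] = digitToInt(c)
  (PySem.List.enumerate l 0).foldl
    (fun r ic => PySem.List.pySetD r (n - 1 - ic.1) (digitToInt ic.2))  -- index always in range
    result

-- ===== PRECONDITION & SPEC =====
def Spec_digitStringToList (val : String) (minSize : Int) (out : List Int) : Prop := out = digitStringToList_alt val minSize
instance (val : String) (minSize : Int) (out : List Int) : Decidable (Spec_digitStringToList val minSize out) := by unfold Spec_digitStringToList; infer_instance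

-- ===== CLAIM (what is proved, stated in full; the proofs are below) =====
def Claim_equal_digitStringToList : Prop := ∀ (val : String) (minSize : Int), Dom_digitStringToList val minSize → Spec_digitStringToList val minSize (digitStringToList val minSize)

-- ===== LEMMAS AND PROOFS =====

-- A's padding loop builds a list of zeros, one per range element.
theorem pad_foldl {β : Type} (xs : List β) (acc : List Int) :
    xs.foldl (fun r _ => r ++ [(0 : Int)]) acc = acc ++ List.replicate xs.length 0 := by
  induction xs generalizing acc with
  | nil => simp
  | cons x t ih => simp [List.foldl, ih, List.replicate_succ]

-- A's digit loop: consing f of each element yields the reversed map prepended to the accumulator.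
theorem cons_foldl (l : List Char) (acc : List Int) :
    l.foldl (fun r c => digitToInt c :: r) acc = (l.map digitToInt).reverse ++ acc := by
  induction l generalizing acc with
  | nil => simp
  | cons c t ih => simp [List.foldl, ih]

theorem digitStringToList_closed (val : String) (minSize : Int) :
    digitStringToList val minSize
      = (val.toList.map digitToInt).reverse ++ List.replicate (minSize - val.toList.length).toNat 0 := by
  unfold digitStringToList
  rw [PySem.List.foldl_pyRange_zero_pyGetD' val.toList ' ' (fun r c => digitToInt c :: r)]
  rw [cons_foldl, pad_foldl]
  simp [PySem.List.length_pyRange_one]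

-- dropping past an updated cell exposes the written value followed by the untouched tail
theorem drop_set_self (l : List Int) (m : Nat) (v : Int) (h : m < l.length) :
    (l.set m v).drop m = v :: l.drop (m + 1) := by
  rw [List.drop_set, if_neg (lt_irrefl m), Nat.sub_self,
      List.drop_eq_getElem_cons (by simpa using h), List.set_cons_zero]

-- B's scatter loop over a suffix s starting at index k (k + |s| = n) fills positions |s|-1 … 0.
theorem scatter_foldl (n : Nat) (s : List Char) (k : Nat) (init : List Int)
    (hkn : k + s.length = n) (hlen : n ≤ init.length) :
    (PySem.List.enumerate s (k : Int)).foldl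
        (fun r ic => PySem.List.pySetD r ((n : Int) - 1 - ic.1) (digitToInt ic.2)) init
      = (s.map digitToInt).reverse ++ init.drop s.length := by
  induction s generalizing k init with
  | nil => simp [PySem.List.enumerate_nil]
  | cons c t ih =>
    rw [PySem.List.enumerate_cons]
    simp only [List.foldl_cons]
    have hidx : (n : Int) - 1 - (k : Int) = (t.length : Nat) := by
      simp only [List.length_cons] at hkn; omega
    have hm : t.length < init.length := by
      simp only [List.length_cons] at hkn; omega
    rw [hidx, PySem.List.pySetD_natCast]
    have : ((k : Int) + 1) = ((k + 1 : Nat) : Int) := by push_cast; ring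
    rw [this, ih (k + 1) _ (by simp only [List.length_cons] at hkn; omega) (by simpa using hlen)]
    rw [drop_set_self init t.length _ hm]
    simp

theorem digitStringToList_alt_closed (val : String) (minSize : Int) :
    digitStringToList_alt val minSize
      = (val.toList.map digitToInt).reverse
          ++ List.replicate ((max (val.toList.length : Int) minSize).toNat - val.toList.length) 0 := by
  show (PySem.List.enumerate val.toList ((0:Nat) : Int)).foldl
        (fun r ic => PySem.List.pySetD r ((val.toList.length : Int) - 1 - ic.1) (digitToInt ic.2))
        (List.replicate (max (val.toList.length : Int) minSize).toNat 0) = _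
  rw [scatter_foldl val.toList.length val.toList 0
        (List.replicate (max (val.toList.length : Int) minSize).toNat 0)
        (by omega)
        (by simp)]
  rw [List.drop_replicate]

-- ===== VERDICT (by name: the statement is the Claim_ definition above) =====
theorem digitStringToList_spec : Claim_equal_digitStringToList := by
  intro val minSize _
  unfold Spec_digitStringToList
  rw [digitStringToList_closed, digitStringToList_alt_closed]
  congr 1
  congr 1
  omega
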